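-- pv_equiv track=rewrite | github.com/dataesr/skolar | project/server/main/training/clinicaltrial.py | is_clinicaltrial
-- ===== SOURCE A (Python) =====
-- def is_clinicaltrial(p):
--     txt = p['text']
--     score = 0
--     evidences = []
--     for f in ['clinicaltrials', 'eudract', 'nct id',
--             'nct0', 'nct1', 'nct2', 'nct3',
--             'nct:0', 'nct:1', 'nct:2', 'nct:3',
--             'nct: 0', 'nct: 1', 'nct: 2', 'nct: 3'
--             ]:
--             if f in txt.lower():
--                 score += 2
--                 evidences.append(f)
--     if score > 1:
--         return True
--     return False
-- ===== SOURCE B (Python) =====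
-- KEYWORDS = ['clinicaltrials', 'eudract', 'nct id',
--             'nct0', 'nct1', 'nct2', 'nct3',
--             'nct:0', 'nct:1', 'nct:2', 'nct:3',
--             'nct: 0', 'nct: 1', 'nct: 2', 'nct: 3']
--
-- def is_clinicaltrial(p):
--     low = p['text'].lower()
--     for i in range(len(low)):
--         for k in KEYWORDS:
--             if low.startswith(k, i):
--                 return True
--     return False
-- ===== Notes on version B (the rewrite author's own statement) =====
-- stated objective: alternative
-- what changed: A runs fifteen separate substring searches over the text with a score/evidence accumulator; B lowercases once and makes a single left-to-right scan, testing at each position whether any keyword starts there.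
import Mathlib
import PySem

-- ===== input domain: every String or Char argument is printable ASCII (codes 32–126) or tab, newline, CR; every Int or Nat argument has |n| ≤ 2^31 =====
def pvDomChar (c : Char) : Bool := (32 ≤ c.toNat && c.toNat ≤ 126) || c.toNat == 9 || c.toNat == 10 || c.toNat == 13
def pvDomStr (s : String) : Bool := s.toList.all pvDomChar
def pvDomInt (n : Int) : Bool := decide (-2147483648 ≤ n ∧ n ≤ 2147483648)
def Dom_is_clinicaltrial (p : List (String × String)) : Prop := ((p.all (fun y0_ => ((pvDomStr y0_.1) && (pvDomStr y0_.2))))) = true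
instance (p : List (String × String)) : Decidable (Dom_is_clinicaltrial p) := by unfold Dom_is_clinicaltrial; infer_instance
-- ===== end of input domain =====

-- B replaces A's fifteen separate substring searches (with a score/evidence accumulator)
-- by a single left-to-right scan of the lowercased text that checks, at each position,
-- whether any keyword starts there (objective: alternative traversal, same cost class).


-- ===== PORT A =====
def ctKeywords : List String :=
  ["clinicaltrials", "eudract", "nct id",
   "nct0", "nct1", "nct2", "nct3",
   "nct:0", "nct:1", "nct:2", "nct:3",
   "nct: 0", "nct: 1", "nct: 2", "nct: 3"]

def is_clinicaltrial (p : List (String × String)) : Bool :=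
  let txt := (PySem.Dict.get? (PySem.Dict.mk p) "text").getD ""   -- Pre_ excludes the KeyError case
  let st := ctKeywords.foldl
    (fun (s : Int × List String) f =>
      if PySem.Str.isIn f (PySem.Str.lower txt) then (s.1 + 2, s.2 ++ [f]) else s)
    (0, [])
  decide (st.1 > 1)

-- ===== PORT B =====
-- 'for i in range(len(low)): for k in KEYWORDS: if low.startswith(k, i): return True'
-- ported as structural recursion on the suffixes of the lowercased character list.
def ctScan : List Char → Bool
  | [] => false
  | c :: rest =>
      (ctKeywords.any (fun k => k.toList.isPrefixOf (c :: rest))) || ctScan rest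

def is_clinicaltrial_alt (p : List (String × String)) : Bool :=
  let low := (PySem.Str.lower ((PySem.Dict.get? (PySem.Dict.mk p) "text").getD "")).toList
  ctScan low

-- ===== PRECONDITION & SPEC =====
-- Pre_ excludes exactly the inputs without a "text" key, on which Python A raises KeyError.
def Pre_is_clinicaltrial (p : List (String × String)) : Prop :=
  (PySem.Dict.get? (PySem.Dict.mk p) "text").isSome = true
instance (p : List (String × String)) : Decidable (Pre_is_clinicaltrial p) := by
  unfold Pre_is_clinicaltrial; infer_instance
def pvWitness_is_clinicaltrial : (List (String × String)) := [("text", "see NCT0123")]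

def Spec_is_clinicaltrial (p : List (String × String)) (out : Bool) : Prop := out = is_clinicaltrial_alt p
instance (p : List (String × String)) (out : Bool) : Decidable (Spec_is_clinicaltrial p out) := by unfold Spec_is_clinicaltrial; infer_instance

-- ===== CLAIM (what is proved, stated in full; the proofs are below) =====
def Claim_equal_is_clinicaltrial : Prop := ∀ (p : List (String × String)), Dom_is_clinicaltrial p → Pre_is_clinicaltrial p → Spec_is_clinicaltrial p (is_clinicaltrial p)

-- ===== LEMMAS AND PROOFS =====

-- A's score accumulator: first component of the fold is init + 2 * (number of matching keywords).
theorem ct_fold_fst (pr : String → Bool) (l : List String) (a : Int) (ev : List String) :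
    (l.foldl (fun (s : Int × List String) f =>
        if pr f then (s.1 + 2, s.2 ++ [f]) else s) (a, ev)).1
      = a + 2 * (l.countP pr : Int) := by
  induction l generalizing a ev with
  | nil => simp
  | cons h t ih =>
      by_cases hp : pr h
      · simp [List.foldl_cons, hp, ih]; ring
      · simp [List.foldl_cons, hp, ih]

-- B's scan finds exactly the texts containing some keyword as an infix.
theorem ctScan_iff (cs : List Char) :
    ctScan cs = true ↔ ∃ k ∈ ctKeywords, k.toList <:+: cs := by
  induction cs with
  | nil =>
      simp only [ctScan]
      constructor
      · intro h; cases h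
      rintro ⟨k, hk, hinf⟩
      exfalso
      have hne : k.toList ≠ [] := by
        fin_cases hk <;> decide
      exact hne (List.eq_nil_of_infix_nil hinf)
  | cons c rest ih =>
      simp only [ctScan, Bool.or_eq_true, List.any_eq_true, ih]
      constructor
      · rintro (⟨k, hk, hpre⟩ | ⟨k, hk, hinf⟩)
        · exact ⟨k, hk, (List.infix_cons_iff).2 (Or.inl (List.isPrefixOf_iff_prefix.1 hpre))⟩
        · exact ⟨k, hk, (List.infix_cons_iff).2 (Or.inr hinf)⟩
      · rintro ⟨k, hk, hinf⟩
        rcases (List.infix_cons_iff).1 hinf with h | h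
        · exact Or.inl ⟨k, hk, List.isPrefixOf_iff_prefix.2 h⟩
        · exact Or.inr ⟨k, hk, h⟩

-- ===== VERDICT (by name: the statement is the Claim_ definition above) =====
theorem is_clinicaltrial_spec : Claim_equal_is_clinicaltrial := by
  intro p _ _
  unfold Spec_is_clinicaltrial is_clinicaltrial is_clinicaltrial_alt
  set txt := (PySem.Dict.get? (PySem.Dict.mk p) "text").getD "" with htxt
  rw [Bool.eq_iff_iff]
  show decide ((ctKeywords.foldl (fun (s : Int × List String) f =>
      if PySem.Str.isIn f (PySem.Str.lower txt) then (s.1 + 2, s.2 ++ [f]) else s) (0, [])).1 > 1) = true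
    ↔ ctScan (PySem.Str.lower txt).toList = true
  rw [ct_fold_fst (fun f => PySem.Str.isIn f (PySem.Str.lower txt)) ctKeywords 0 []]
  rw [ctScan_iff]
  have hpos : (0 : Int) + 2 * (ctKeywords.countP (fun f => PySem.Str.isIn f (PySem.Str.lower txt)) : Int) > 1
      ↔ ctKeywords.countP (fun f => PySem.Str.isIn f (PySem.Str.lower txt)) ≠ 0 := by
    omega
  rw [decide_eq_true_iff, hpos, Ne, List.countP_eq_zero]
  push Not
  constructor
  · rintro ⟨k, hk, hin⟩
    exact ⟨k, hk, (PySem.Str.isIn_iff_infix _ _).1 hin⟩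
  · rintro ⟨k, hk, hinf⟩
    exact ⟨k, hk, (PySem.Str.isIn_iff_infix _ _).2 hinf⟩
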